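-- pv_equiv track=rewrite | github.com/runnywolf/ran | src/exam-db-tool/make-exam-v2.py | decodeProblemModeParams
-- ===== SOURCE A (Python) =====
-- def decodeProblemModeParams(sectionBaseNames: list[str], params: list[str]) -> dict[str]: # 解碼多選題設定
-- 	problemMultiType = { key: "" for key in sectionBaseNames } # 題目的多選題類型, 空字串代表沒有選項, 大小寫英文字母代表最後一個選項編號
--
-- 	for param in params: # 參數格式為: <最後一個選項編號><題號>, 題號若為 * 會全部設成一樣的多選題結構
-- 		if param[1] == "*":
-- 			problemMultiType = { key: param[0] for key in sectionBaseNames } # 將所有題目都設為一樣的多選題結構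
-- 		else:
-- 			if param[1:] in problemMultiType: problemMultiType[param[1:]] = param[0] # 將某一題設成多選題
--
-- 	return problemMultiType
-- ===== SOURCE B (Python) =====
-- def decodeProblemModeParams(sectionBaseNames: list[str], params: list[str]) -> dict[str]:
-- 	# One pass: find the last '*' param, apply it once as the base value,
-- 	# then index the individual updates that come after it.
-- 	last_star = -1
-- 	for i, param in enumerate(params):
-- 		if param[1] == "*":
-- 			last_star = i
-- 	base = params[last_star][0] if last_star >= 0 else ""
-- 	updates = {}
-- 	for param in params[last_star + 1:]:
-- 		updates[param[1:]] = param[0]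
-- 	return { key: updates.get(key, base) for key in sectionBaseNames }
-- ===== Notes on version B (the rewrite author's own statement) =====
-- stated objective: alternative
-- what changed: Instead of rebuilding the whole per-section dict at every '*' param, B locates the last '*' once, takes its option letter as the base value, indexes only the later individual updates in a dict, and builds the result in a single pass over the sections.
import Mathlib
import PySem

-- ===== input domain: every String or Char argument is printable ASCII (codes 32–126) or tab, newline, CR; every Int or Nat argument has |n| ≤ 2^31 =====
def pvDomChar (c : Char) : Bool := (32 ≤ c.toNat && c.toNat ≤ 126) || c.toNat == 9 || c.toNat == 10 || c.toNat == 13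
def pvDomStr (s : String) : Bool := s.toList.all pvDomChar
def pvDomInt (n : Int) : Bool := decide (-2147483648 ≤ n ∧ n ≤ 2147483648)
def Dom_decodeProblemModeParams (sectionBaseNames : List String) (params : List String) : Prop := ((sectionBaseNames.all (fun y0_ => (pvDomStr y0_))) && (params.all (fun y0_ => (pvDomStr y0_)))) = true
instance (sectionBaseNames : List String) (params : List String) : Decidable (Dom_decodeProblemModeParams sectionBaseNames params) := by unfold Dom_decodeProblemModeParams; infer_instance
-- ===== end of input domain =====

-- B locates the last '*' param once and indexes the later individual updates, instead of rebuilding the whole per-section dict at every '*' (an alternative single-pass decomposition).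


-- shared helpers for the Python expressions param[1] == "*", param[0], param[1:]
-- (pvStar/pvFirst return false/"" where Python's indexing would raise IndexError; Pre_ excludes those params)
def pvStar (p : String) : Bool :=
  match PySem.Str.pyGet? p 1 with
  | some c => c == '*'
  | none => false

def pvFirst (p : String) : String :=
  match PySem.Str.pyGet? p 0 with
  | some c => String.ofList [c]
  | none => ""

def pvRest (p : String) : String := PySem.Str.slice p (some 1) none

-- ===== PORT A =====
def decodeProblemModeParams (sectionBaseNames : List String) (params : List String) : List (String × String) :=
  (params.foldl
    (fun d p =>
      if pvStar p then
        sectionBaseNames.foldl (fun d' k => d'.insert k (pvFirst p)) PySem.Dict.empty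
      else
        if d.contains (pvRest p) then d.insert (pvRest p) (pvFirst p) else d)
    (sectionBaseNames.foldl (fun d k => d.insert k "") PySem.Dict.empty)).items

-- ===== PORT B =====
def decodeProblemModeParams_alt (sectionBaseNames : List String) (params : List String) : List (String × String) :=
  let lastStar : Int :=
    (PySem.List.enumerate params 0).foldl (fun acc ip => if pvStar ip.2 then ip.1 else acc) (-1)
  let base : String := if 0 ≤ lastStar then pvFirst (PySem.List.pyGetD params lastStar "") else ""
  let updates : PySem.Dict String String :=
    (PySem.List.slice params (some (lastStar + 1)) none).foldl
      (fun d p => d.insert (pvRest p) (pvFirst p)) PySem.Dict.empty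
  (sectionBaseNames.foldl (fun d k => d.insert k (updates.getD k base)) PySem.Dict.empty).items

-- ===== PRECONDITION & SPEC =====
-- Pre_ excludes exactly the inputs with a param of length < 2, on which Python A raises IndexError at param[1].
def Pre_decodeProblemModeParams (sectionBaseNames : List String) (params : List String) : Prop :=
  ∀ p ∈ params, 2 ≤ p.toList.length
instance (sectionBaseNames : List String) (params : List String) : Decidable (Pre_decodeProblemModeParams sectionBaseNames params) := by unfold Pre_decodeProblemModeParams; infer_instance

def pvWitness_decodeProblemModeParams : List String × List String := (["a", "b"], ["C*", "Da"])

def Spec_decodeProblemModeParams (sectionBaseNames : List String) (params : List String) (out : List (String × String)) : Prop := out = decodeProblemModeParams_alt sectionBaseNames params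
instance (sectionBaseNames : List String) (params : List String) (out : List (String × String)) : Decidable (Spec_decodeProblemModeParams sectionBaseNames params out) := by unfold Spec_decodeProblemModeParams; infer_instance

-- ===== CLAIM (what is proved, stated in full; the proofs are below) =====
def Claim_equal_decodeProblemModeParams : Prop := ∀ (sectionBaseNames : List String) (params : List String), Dom_decodeProblemModeParams sectionBaseNames params → Pre_decodeProblemModeParams sectionBaseNames params → Spec_decodeProblemModeParams sectionBaseNames params (decodeProblemModeParams sectionBaseNames params)

-- ===== LEMMAS AND PROOFS =====

-- the dict both programs end with: for each section key (deduped, in order) a value f k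
def pvBuild (sbn : List String) (f : String → String) : PySem.Dict String String :=
  sbn.foldl (fun d k => d.insert k (f k)) PySem.Dict.empty

-- A's per-key effect of one param
def pvStep (k : String) (v : String) (p : String) : String :=
  if pvStar p then pvFirst p else if pvRest p = k then pvFirst p else v

-- B's three let-bound quantities, as functions of params
def pvLS (params : List String) : Int :=
  (PySem.List.enumerate params 0).foldl (fun acc ip => if pvStar ip.2 then ip.1 else acc) (-1)
def pvBase (params : List String) : String :=
  if 0 ≤ pvLS params then pvFirst (PySem.List.pyGetD params (pvLS params) "") else ""
def pvUpd (params : List String) : PySem.Dict String String :=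
  (PySem.List.slice params (some (pvLS params + 1)) none).foldl
    (fun d p => d.insert (pvRest p) (pvFirst p)) PySem.Dict.empty

theorem pv_keys_build (sbn : List String) (f : String → String) :
    (pvBuild sbn f).keys = PySem.List.dedup sbn := by
  unfold pvBuild
  rw [PySem.Dict.keys_foldl_insert sbn (fun _ k => f k) PySem.Dict.empty]
  simp [PySem.Dict.keys_empty, PySem.Set.update_nil_left]

theorem pv_items_build (sbn : List String) (f : String → String) :
    (pvBuild sbn f).items = (PySem.List.dedup sbn).map (fun k => (k, f k)) := by
  induction sbn using List.reverseRecOn with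
  | nil => rfl
  | append_singleton sbn x ih =>
    unfold pvBuild at *
    rw [List.foldl_append]
    simp only [List.foldl_cons, List.foldl_nil]
    by_cases hx : x ∈ sbn
    · have hc : (List.foldl (fun d k => d.insert k (f k)) PySem.Dict.empty sbn).contains x = true := by
        rw [PySem.Dict.contains_eq_decide_mem_keys]
        have hkeys := pv_keys_build sbn f
        unfold pvBuild at hkeys
        rw [hkeys]
        simp [hx]
      rw [PySem.Dict.items_insert_of_contains _ _ hc, ih]
      have hd : PySem.List.dedup (sbn ++ [x]) = PySem.List.dedup sbn := by
        simp only [PySem.List.dedup_eq_ofList, PySem.Set.ofList_append_singleton]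
        exact PySem.Set.add_of_mem (by simp [PySem.Set.mem_ofList, hx])
      rw [hd, List.map_map]
      refine List.map_congr_left (fun k hk => ?_)
      by_cases hkx : k = x
      · subst hkx; simp
      · simp [Function.comp, hkx]
    · have hc : (List.foldl (fun d k => d.insert k (f k)) PySem.Dict.empty sbn).contains x = false := by
        rw [PySem.Dict.contains_eq_decide_mem_keys]
        have hkeys := pv_keys_build sbn f
        unfold pvBuild at hkeys
        rw [hkeys]
        simp [hx]
      rw [PySem.Dict.items_insert_of_not_contains _ _ hc, ih]
      have hd : PySem.List.dedup (sbn ++ [x]) = PySem.List.dedup sbn ++ [x] := by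
        simp only [PySem.List.dedup_eq_ofList, PySem.Set.ofList_append_singleton]
        exact PySem.Set.add_of_not_mem (by simp [PySem.Set.mem_ofList, hx])
      rw [hd, List.map_append]
      rfl

theorem pv_build_congr (sbn : List String) (f g : String → String)
    (h : ∀ k ∈ sbn, f k = g k) : pvBuild sbn f = pvBuild sbn g := by
  apply PySem.Dict.ext
  rw [pv_items_build, pv_items_build]
  refine List.map_congr_left (fun k hk => ?_)
  rw [h k ((PySem.List.mem_dedup sbn k).1 hk)]

theorem pv_build_insert (sbn : List String) (f : String → String) (k' : String) (v : String)
    (h : k' ∈ sbn) :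
    (pvBuild sbn f).insert k' v = pvBuild sbn (fun k => if k = k' then v else f k) := by
  apply PySem.Dict.ext
  have hc : (pvBuild sbn f).contains k' = true := by
    rw [PySem.Dict.contains_eq_decide_mem_keys, pv_keys_build]
    simp [h]
  rw [PySem.Dict.items_insert_of_contains _ _ hc, pv_items_build, pv_items_build, List.map_map]
  refine List.map_congr_left (fun k hk => ?_)
  by_cases hkx : k = k'
  · subst hkx; simp
  · simp [Function.comp, hkx]

-- A's loop, starting from a dict of shape pvBuild sbn f, stays in that shape
theorem pv_loopA (sbn : List String) (params : List String) (f : String → String) :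
    params.foldl
      (fun d p =>
        if pvStar p then
          sbn.foldl (fun d' k => d'.insert k (pvFirst p)) PySem.Dict.empty
        else
          if d.contains (pvRest p) then d.insert (pvRest p) (pvFirst p) else d)
      (pvBuild sbn f)
    = pvBuild sbn (fun k => params.foldl (pvStep k) (f k)) := by
  induction params generalizing f with
  | nil => rfl
  | cons p ps ih =>
    simp only [List.foldl_cons]
    by_cases hs : pvStar p
    · rw [if_pos hs]
      have hb : sbn.foldl (fun d' k => d'.insert k (pvFirst p)) PySem.Dict.empty
          = pvBuild sbn (fun _ => pvFirst p) := rfl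
      rw [hb, ih]
      refine pv_build_congr _ _ _ (fun k _ => ?_)
      simp [pvStep, hs]
    · rw [if_neg hs]
      by_cases hm : pvRest p ∈ sbn
      · have hc : (pvBuild sbn f).contains (pvRest p) = true := by
          rw [PySem.Dict.contains_eq_decide_mem_keys, pv_keys_build]
          simp [hm]
        rw [if_pos hc, pv_build_insert _ _ _ _ hm, ih]
        refine pv_build_congr _ _ _ (fun k _ => ?_)
        congr 1
        simp only [pvStep, hs, Bool.false_eq_true, if_false]
        by_cases hk : pvRest p = k
        · simp [hk]
        · rw [if_neg hk, if_neg (fun h => hk (Eq.symm h))]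
      · have hc : (pvBuild sbn f).contains (pvRest p) = false := by
          rw [PySem.Dict.contains_eq_decide_mem_keys, pv_keys_build]
          simp [hm]
        rw [if_neg (by simp [hc]), ih]
        refine pv_build_congr _ _ _ (fun k hk => ?_)
        congr 1
        have hne : pvRest p ≠ k := fun h => hm (h ▸ hk)
        simp [pvStep, hs, hne]

theorem pv_ls_append (params : List String) (p : String) :
    pvLS (params ++ [p]) = if pvStar p then (params.length : Int) else pvLS params := by
  unfold pvLS
  rw [PySem.List.enumerate_append, List.foldl_append]
  simp [PySem.List.enumerate]

theorem pv_ls_bounds (params : List String) :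
    -1 ≤ pvLS params ∧ pvLS params < params.length := by
  induction params using List.reverseRecOn with
  | nil => simp [pvLS, PySem.List.enumerate]
  | append_singleton params p ih =>
    rw [pv_ls_append]
    by_cases hs : pvStar p <;> simp [hs] <;> omega

-- B's value at key k is A's per-key fold over all params
theorem pv_valB (params : List String) (k : String) :
    (pvUpd params).getD k (pvBase params) = params.foldl (pvStep k) "" := by
  induction params using List.reverseRecOn with
  | nil => rfl
  | append_singleton params p ih =>
    rw [List.foldl_append]
    simp only [List.foldl_cons, List.foldl_nil]
    obtain ⟨hlo, hhi⟩ := pv_ls_bounds params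
    by_cases hs : pvStar p
    · have hls : pvLS (params ++ [p]) = (params.length : Int) := by rw [pv_ls_append, if_pos hs]
      have hupd : pvUpd (params ++ [p]) = PySem.Dict.empty := by
        unfold pvUpd
        rw [hls, PySem.List.slice_from _ (by positivity)]
        have hn : ((params.length : Int) + 1).toNat = params.length + 1 := by omega
        rw [hn, List.drop_eq_nil_of_le (by simp)]; rfl
      have hbase : pvBase (params ++ [p]) = pvFirst p := by
        unfold pvBase
        rw [hls, if_pos (by positivity)]
        congr 1
        rw [PySem.List.pyGetD_eq_getElem _ _ (by positivity) (by simp)]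
        simp
      rw [hupd, hbase, PySem.Dict.getD_empty, pvStep, if_pos hs]
    · have hls : pvLS (params ++ [p]) = pvLS params := by rw [pv_ls_append, if_neg hs]
      have hbase : pvBase (params ++ [p]) = pvBase params := by
        unfold pvBase
        rw [hls]
        by_cases h0 : 0 ≤ pvLS params
        · rw [if_pos h0, if_pos h0]
          congr 1
          rw [PySem.List.pyGetD_eq_getElem _ _ h0 (by simp; omega),
              PySem.List.pyGetD_eq_getElem _ _ h0 (by exact_mod_cast hhi)]
          rw [List.getElem_append_left (by omega)]
        · rw [if_neg h0, if_neg h0]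
      have hupd : pvUpd (params ++ [p]) = (pvUpd params).insert (pvRest p) (pvFirst p) := by
        unfold pvUpd
        rw [hls, PySem.List.slice_from _ (by omega), PySem.List.slice_from _ (by omega)]
        rw [List.drop_append_of_le_length (by omega), List.foldl_append]
        simp
      rw [hupd, hbase, PySem.Dict.getD_insert, pvStep, if_neg hs]
      by_cases hk : pvRest p = k
      · rw [if_pos hk, if_pos (Eq.symm hk)]
      · rw [if_neg hk, if_neg (fun h => hk (Eq.symm h)), ih]

-- ===== VERDICT (by name: the statement is the Claim_ definition above) =====
theorem decodeProblemModeParams_spec : Claim_equal_decodeProblemModeParams := by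
  intro sbn params _ _
  unfold Spec_decodeProblemModeParams
  show decodeProblemModeParams sbn params = decodeProblemModeParams_alt sbn params
  have hA : decodeProblemModeParams sbn params
      = (pvBuild sbn (fun k => params.foldl (pvStep k) "")).items := by
    unfold decodeProblemModeParams
    rw [show (sbn.foldl (fun d k => d.insert k "") PySem.Dict.empty)
        = pvBuild sbn (fun _ => "") from rfl, pv_loopA]
  have hB : decodeProblemModeParams_alt sbn params
      = (pvBuild sbn (fun k => (pvUpd params).getD k (pvBase params))).items := rfl
  rw [hA, hB, pv_items_build, pv_items_build]
  exact List.map_congr_left (fun k _ => by rw [pv_valB params k])
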